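-- pv_equiv track=rewrite | github.com/Bumbi54/Advent2018 | Day8/Day8.py | recursiveFunction
-- ===== SOURCE A (Python) =====
-- def recursiveFunction(index, nodeList, sum):
--     #this is recursive that is call for every node
--
--     orignalIndex = index
--     #if node doesn't have childrens
--     if nodeList[index] == 0:
--
--         numberOfMetadata = nodeList[index + 1]
--         #return sum of metaData for currnet node
--         tmpSum = 0
--         for metaData in nodeList[index + 2: index + numberOfMetadata + 2]:
--             tmpSum += metaData
--
--         return (numberOfMetadata, tmpSum)
--
--     for i in range(nodeList[index]):
--
--         resultTuple = recursiveFunction(index + 2, nodeList, 0)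
--
--         index += resultTuple[0] + 2
--         sum += resultTuple[1]
--
--     numberOfMetadata = nodeList[orignalIndex + 1]
--     # return sum of metaData for currnet node
--     for metaData in nodeList[index + 2: index + 2 + numberOfMetadata]:
--         sum += metaData
--
--     return (index - orignalIndex + numberOfMetadata, sum)
-- ===== SOURCE B (Python) =====
-- def recursiveFunction(index, nodeList, sum):
--     # Iterative parser of the one subtree rooted at index: an explicit stack of
--     # (remaining-children, metadata-count) pairs, one running pointer p, and the
--     # metadata total accumulated directly into sum.
--     stack = [(nodeList[index], nodeList[index + 1])]
--     p = index + 2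
--     while stack:
--         rem, meta = stack.pop()
--         if rem <= 0:
--             for v in nodeList[p : p + meta]:
--                 sum += v
--             p += meta
--         else:
--             stack.append((rem - 1, meta))
--             stack.append((nodeList[p], nodeList[p + 1]))
--             p += 2
--     return (p - index - 2, sum)
-- ===== Notes on version B (the rewrite author's own statement) =====
-- stated objective: alternative
-- what changed: Replaces A's recursive descent (one recursive call per child, carrying a partial sum) by a single iterative loop over an explicit stack of (remaining-children, metadata-count) pairs with one running pointer and the metadata total accumulated into sum.
-- intended difference: When the root node at index is a leaf (nodeList[index] == 0) and sum != 0, A's leaf branch ignores the passed-in accumulator and returns only the leaf's own metadata total, while B returns sum + metadata total; including the accumulator argument is the intended behaviour of an accumulating parser (internal roots do include it in A too). — e.g. on recursiveFunction(0, [0, 1, 5], 7): A returns (1, 5), B returns (1, 12)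
import Mathlib
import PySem

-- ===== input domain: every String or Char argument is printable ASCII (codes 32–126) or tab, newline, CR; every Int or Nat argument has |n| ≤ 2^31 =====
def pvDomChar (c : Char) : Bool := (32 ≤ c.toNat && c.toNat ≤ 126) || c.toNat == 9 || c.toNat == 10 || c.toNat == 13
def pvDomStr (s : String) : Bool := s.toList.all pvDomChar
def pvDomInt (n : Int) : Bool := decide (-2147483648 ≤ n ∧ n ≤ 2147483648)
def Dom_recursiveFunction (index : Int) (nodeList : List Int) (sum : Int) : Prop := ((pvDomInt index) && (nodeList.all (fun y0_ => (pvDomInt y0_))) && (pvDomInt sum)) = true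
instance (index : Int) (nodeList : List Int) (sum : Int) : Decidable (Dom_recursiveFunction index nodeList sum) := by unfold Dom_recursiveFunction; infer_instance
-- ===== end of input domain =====

-- B replaces A's recursive descent by an iterative parser over an explicit stack
-- of (remaining-children, metadata-count) pairs (objective: alternative); B always
-- adds the sum argument, where A's leaf-root branch drops it (see D_ below).

-- ===== PORT A =====
-- Transliteration of A. Python recursion is made total with a fuel argument
-- (2*len+2 bounds the recursion depth whenever the Python terminates, since the
-- positions along any call chain are distinct and lie in [-len, len)); fuel
-- exhaustion / IndexError yield `none`, excluded by Pre_.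
mutual
def recAux : Nat → Int → List Int → Int → Option (Int × Int)
  | 0, _, _, _ => none
  | f+1, index, nodeList, s =>
    -- orignalIndex = index
    match PySem.List.pyGet? nodeList index with
    | none => none                                     -- nodeList[index] raises
    | some c =>
      if c = 0 then
        -- leaf: numberOfMetadata = nodeList[index+1]; sum the metadata slice
        match PySem.List.pyGet? nodeList (index + 1) with
        | none => none
        | some m =>
          some (m, (PySem.List.slice nodeList (some (index + 2)) (some (index + m + 2))).foldl (· + ·) 0)
      else
        -- for i in range(nodeList[index]): recurse at index+2, advance index, add sum
        match childLoop f (max c 0).toNat index nodeList s with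
        | none => none
        | some (idx2, s2) =>
          match PySem.List.pyGet? nodeList (index + 1) with    -- nodeList[orignalIndex+1]
          | none => none
          | some m =>
            some (idx2 - index + m,
                  s2 + (PySem.List.slice nodeList (some (idx2 + 2)) (some (idx2 + 2 + m))).foldl (· + ·) 0)

def childLoop : Nat → Nat → Int → List Int → Int → Option (Int × Int)
  | _, 0, index, _, s => some (index, s)
  | 0, _+1, _, _, _ => none
  | f+1, k+1, index, nodeList, s =>
    match recAux f (index + 2) nodeList 0 with
    | none => none
    | some r => childLoop f k (index + r.1 + 2) nodeList (s + r.2)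
end

def recursiveFunction (index : Int) (nodeList : List Int) (sum : Int) : Int × Int :=
  (recAux (2 * nodeList.length + 2) index nodeList sum).getD (0, 0)

-- ===== PORT B =====
-- Shape certificate used ONLY as Pre_ and as the totality guard (loop fuel) of
-- the B port: size of the subtree at q and the number of loop iterations B
-- spends on it.  It checks shape (header reads succeed) and computes no sums.
mutual
def pvShape : Nat → List Int → Int → Option (Int × Nat)
  | 0, _, _ => none
  | f+1, l, q =>
    match PySem.List.pyGet? l q with
    | none => none
    | some c =>
      match PySem.List.pyGet? l (q + 1) with
      | none => none
      | some m =>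
        match pvChild f l (max c 0).toNat q with
        | none => none
        | some (idx2, st) => some (idx2 - q + m, st + 1)

def pvChild : Nat → List Int → Nat → Int → Option (Int × Nat)
  | _, _, 0, index => some (index, 0)
  | 0, _, _+1, _ => none
  | f+1, l, k+1, index =>
    match pvShape f l (index + 2) with
    | none => none
    | some (csz, cst) =>
      match pvChild f l k (index + csz + 2) with
      | none => none
      | some (idx2, st) => some (idx2, cst + 1 + st)
end

-- Source B's while loop, fueled (fuel is only a totality guard; Pre_ guarantees enough).
def bloop : Nat → List (Int × Int) → Int → List Int → Int → Option (Int × Int)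
  | 0, _, _, _, _ => none
  | fb+1, stack, p, l, s =>
    match stack with
    | [] => some (p, s)                                   -- while stack: … ended
    | (rem, mt) :: st =>
      if rem ≤ 0 then
        bloop fb st (p + mt) l
          (s + (PySem.List.slice l (some p) (some (p + mt))).foldl (· + ·) 0)
      else
        match PySem.List.pyGet? l p with
        | none => none
        | some c2 =>
          match PySem.List.pyGet? l (p + 1) with
          | none => none
          | some m2 => bloop fb ((c2, m2) :: (rem - 1, mt) :: st) (p + 2) l s

def recursiveFunction_alt (index : Int) (nodeList : List Int) (sum : Int) : Int × Int :=
  match PySem.List.pyGet? nodeList index with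
  | none => (0, 0)
  | some c =>
    match PySem.List.pyGet? nodeList (index + 1) with
    | none => (0, 0)
    | some m =>
      let fuelB : Nat :=
        match pvShape (2 * nodeList.length + 2) nodeList index with
        | some (_, st) => st + 1
        | none => 0
      match bloop fuelB [(c, m)] (index + 2) nodeList sum with
      | none => (0, 0)
      | some (p, s) => (p - index - 2, s)

-- ===== PRECONDITION & SPEC =====
-- Pre_ says: nodeList encodes, at position index, one well-formed subtree in
-- this recursive header+children+metadata format (exactly the inputs on which
-- Python A returns normally; everywhere else A raises IndexError or exceeds the
-- recursion limit).  Well-formedness of a recursively defined format is itself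
-- unavoidably recursive: pvShape is a pure shape certificate (which header
-- reads succeed and which sizes they declare); it never computes the output.
def Pre_recursiveFunction (index : Int) (nodeList : List Int) (sum : Int) : Prop :=
  (pvShape (2 * nodeList.length + 2) nodeList index).isSome = true
instance (index : Int) (nodeList : List Int) (sum : Int) : Decidable (Pre_recursiveFunction index nodeList sum) := by unfold Pre_recursiveFunction; infer_instance
def pvWitness_recursiveFunction : Int × List Int × Int := (0, [2, 3, 0, 3, 10, 11, 12, 1, 1, 0, 1, 99, 2, 1, 1, 2], 0)

-- When the root at index is a leaf (nodeList[index] == 0) and sum ≠ 0, A's leaf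
-- branch ignores the passed-in accumulator and returns only the leaf's own
-- metadata total, while B returns sum + that total; including the accumulator is
-- the intended behaviour (A itself includes it for every internal root).
def D_recursiveFunction (index : Int) (nodeList : List Int) (sum : Int) : Prop :=
  PySem.List.pyGet? nodeList index = some 0 ∧ sum ≠ 0
instance (index : Int) (nodeList : List Int) (sum : Int) : Decidable (D_recursiveFunction index nodeList sum) := by unfold D_recursiveFunction; infer_instance

def Spec_recursiveFunction (index : Int) (nodeList : List Int) (sum : Int) (out : Int × Int) : Prop := ¬ D_recursiveFunction index nodeList sum → out = recursiveFunction_alt index nodeList sum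
instance (index : Int) (nodeList : List Int) (sum : Int) (out : Int × Int) : Decidable (Spec_recursiveFunction index nodeList sum out) := by unfold Spec_recursiveFunction; infer_instance

def pvDiffWitness_recursiveFunction : Int × List Int × Int := (0, [0, 1, 5], 7)
def pvDiffWitnessOut_recursiveFunction : (Int × Int) × (Int × Int) := ((1, 5), (1, 12))

-- ===== CLAIM (what is proved, stated in full; the proofs are below) =====
def Claim_unchanged_recursiveFunction : Prop := ∀ (index : Int) (nodeList : List Int) (sum : Int), Dom_recursiveFunction index nodeList sum → Pre_recursiveFunction index nodeList sum → Spec_recursiveFunction index nodeList sum (recursiveFunction index nodeList sum)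
def Claim_changed_recursiveFunction : Prop := Dom_recursiveFunction (pvDiffWitness_recursiveFunction.1) (pvDiffWitness_recursiveFunction.2.1) (pvDiffWitness_recursiveFunction.2.2) ∧ Pre_recursiveFunction (pvDiffWitness_recursiveFunction.1) (pvDiffWitness_recursiveFunction.2.1) (pvDiffWitness_recursiveFunction.2.2) ∧ D_recursiveFunction (pvDiffWitness_recursiveFunction.1) (pvDiffWitness_recursiveFunction.2.1) (pvDiffWitness_recursiveFunction.2.2) ∧ recursiveFunction (pvDiffWitness_recursiveFunction.1) (pvDiffWitness_recursiveFunction.2.1) (pvDiffWitness_recursiveFunction.2.2) = pvDiffWitnessOut_recursiveFunction.1 ∧ recursiveFunction_alt (pvDiffWitness_recursiveFunction.1) (pvDiffWitness_recursiveFunction.2.1) (pvDiffWitness_recursiveFunction.2.2) = pvDiffWitnessOut_recursiveFunction.2 ∧ pvDiffWitnessOut_recursiveFunction.1 ≠ pvDiffWitnessOut_recursiveFunction.2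
def Claim_exact_recursiveFunction : Prop := ∀ (index : Int) (nodeList : List Int) (sum : Int), Dom_recursiveFunction index nodeList sum → Pre_recursiveFunction index nodeList sum → D_recursiveFunction index nodeList sum → recursiveFunction index nodeList sum ≠ recursiveFunction_alt index nodeList sum

-- ===== LEMMAS AND PROOFS =====

-- The statement proved for every fuel level: a shape certificate at q pins down
-- both A's recursion value and the exact behaviour of B's stack loop on the
-- entry for the node at q.
def PvMain (f : Nat) : Prop :=
  ∀ (l : List Int) (q sz : Int) (st : Nat),
    pvShape f l q = some (sz, st) →
    ∃ c m t, PySem.List.pyGet? l q = some c ∧ PySem.List.pyGet? l (q + 1) = some m ∧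
      (∀ s, recAux f q l s = some (sz, if c = 0 then t else s + t)) ∧
      (∀ (stack : List (Int × Int)) (tot : Int) (extra : Nat),
        bloop (st + extra) ((c, m) :: stack) (q + 2) l tot
          = bloop extra stack (q + sz + 2) l (tot + t))

-- The companion statement for a run of the children loop.
def PvChildSim (f : Nat) : Prop :=
  ∀ (k : Nat) (l : List Int) (idx idx2 : Int) (st : Nat),
    pvChild f l k idx = some (idx2, st) →
    ∃ u, (∀ s0, childLoop f k idx l s0 = some (idx2, s0 + u)) ∧
      (∀ (m : Int) (stack : List (Int × Int)) (tot : Int) (extra : Nat),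
        bloop (st + extra) (((k : Int), m) :: stack) (idx + 2) l tot
          = bloop extra (((0 : Int), m) :: stack) (idx2 + 2) l (tot + u))

theorem pv_joint : ∀ f, PvMain f ∧ PvChildSim f := by
  intro f
  induction f with
  | zero =>
    constructor
    · intro l q sz st h; simp [pvShape] at h
    · intro k l idx idx2 st h
      cases k with
      | zero =>
        simp [pvChild] at h
        obtain ⟨h1, h2⟩ := h
        subst h1; subst h2
        exact ⟨0, by intro s0; simp [childLoop], by intro m stack tot extra; simp⟩
      | succ k => simp [pvChild] at h
  | succ f ih =>
    constructor
    · -- PvMain (f+1)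
      intro l q sz st h
      simp only [pvShape] at h
      cases hg1 : PySem.List.pyGet? l q with
      | none => rw [hg1] at h; simp at h
      | some c =>
        rw [hg1] at h
        simp only at h
        cases hg2 : PySem.List.pyGet? l (q + 1) with
        | none => rw [hg2] at h; simp at h
        | some m =>
          rw [hg2] at h
          simp only at h
          cases hcx : pvChild f l (max c 0).toNat q with
          | none => rw [hcx] at h; simp at h
          | some r =>
            obtain ⟨idx2, stC⟩ := r
            rw [hcx] at h
            simp only [Option.some.injEq, Prod.mk.injEq] at h
            obtain ⟨hsz, hst⟩ := h
            by_cases hc : c ≤ 0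
            · -- root has no (certified) children: A's leaf branch (c = 0) or an
              -- empty range(c) (c < 0); B's loop takes the rem ≤ 0 branch.
              have hk0 : (max c 0).toNat = 0 := by
                have : max c 0 = 0 := max_eq_right hc
                rw [this]; rfl
              rw [hk0] at hcx
              simp [pvChild] at hcx
              obtain ⟨hq, hst0⟩ := hcx
              refine ⟨c, m, (PySem.List.slice l (some (q + 2)) (some (q + 2 + m))).foldl (· + ·) 0, rfl, rfl, ?_, ?_⟩
              · intro s
                by_cases hc0 : c = 0
                · subst hc0
                  simp only [recAux, hg1, hg2]
                  have hb : q + m + 2 = q + 2 + m := by ring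
                  rw [hb]
                  simp only [if_true, Option.some.injEq, Prod.mk.injEq]
                  exact ⟨by omega, trivial⟩
                · simp only [recAux, hg1, if_neg hc0, hk0, childLoop, hg2]
                  simp only [Option.some.injEq, Prod.mk.injEq]
                  exact ⟨by omega, trivial⟩
              · intro stack tot extra
                have hst1 : st = 1 := by omega
                have hb2 : q + sz + 2 = q + 2 + m := by omega
                rw [hst1, hb2]
                have hfuel : 1 + extra = extra + 1 := by omega
                rw [hfuel]
                simp [bloop, hc]
            · -- internal root: children as certified by pvChild
              rw [not_le] at hc
              have hcne : ¬ c = 0 := by omega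
              have hcast : (((max c 0).toNat : Nat) : Int) = c := by
                have h1 : max c 0 = c := max_eq_left (by omega)
                rw [Int.toNat_of_nonneg (le_max_right c 0), h1]
              obtain ⟨u, hcl, hbl⟩ := ih.2 (max c 0).toNat l q idx2 stC hcx
              refine ⟨c, m, u + (PySem.List.slice l (some (idx2 + 2)) (some (idx2 + 2 + m))).foldl (· + ·) 0, rfl, rfl, ?_, ?_⟩
              · intro s
                simp only [recAux, hg1, if_neg hcne]
                rw [hcl s]
                simp only [hg2, Option.some.injEq, Prod.mk.injEq]
                exact ⟨by omega, by ring⟩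
              · intro stack tot extra
                have hfuel : st + extra = stC + (1 + extra) := by omega
                rw [hfuel]
                rw [← hcast]
                rw [hbl m stack tot (1 + extra)]
                have hfuel2 : 1 + extra = extra + 1 := by omega
                rw [hfuel2]
                simp only [bloop]
                have h0le : ((0 : Int) ≤ 0) := le_refl 0
                rw [if_pos h0le]
                have hb2 : q + sz + 2 = idx2 + 2 + m := by omega
                rw [hb2]
                have hsum : tot + u + (PySem.List.slice l (some (idx2 + 2)) (some (idx2 + 2 + m))).foldl (· + ·) 0
                    = tot + (u + (PySem.List.slice l (some (idx2 + 2)) (some (idx2 + 2 + m))).foldl (· + ·) 0) := by ring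
                rw [hsum]
    · -- PvChildSim (f+1)
      intro k l idx idx2 st h
      cases k with
      | zero =>
        simp [pvChild] at h
        obtain ⟨h1, h2⟩ := h
        subst h1; subst h2
        exact ⟨0, by intro s0; simp [childLoop], by intro m stack tot extra; simp⟩
      | succ k =>
        simp only [pvChild] at h
        cases hs : pvShape f l (idx + 2) with
        | none => rw [hs] at h; simp at h
        | some r =>
          obtain ⟨csz, cst⟩ := r
          rw [hs] at h
          simp only at h
          cases hc : pvChild f l k (idx + csz + 2) with
          | none => rw [hc] at h; simp at h
          | some r2 =>
            obtain ⟨idx2', st'⟩ := r2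
            rw [hc] at h
            simp only [Option.some.injEq, Prod.mk.injEq] at h
            obtain ⟨h1, h2⟩ := h
            rw [h1] at hc
            obtain ⟨c2, m2, t, hg1, hg2, hrec, hbl⟩ := ih.1 l (idx + 2) csz cst hs
            obtain ⟨u', hcl', hbl'⟩ := ih.2 k l (idx + csz + 2) idx2 st' hc
            refine ⟨t + u', ?_, ?_⟩
            · intro s0
              have hr0 : recAux f (idx + 2) l 0 = some (csz, t) := by
                have := hrec 0
                by_cases hc2 : c2 = 0 <;> simp [hc2] at this ⊢ <;> exact this
              simp only [childLoop, hr0]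
              rw [hcl' (s0 + t)]
              simp only [Option.some.injEq, Prod.mk.injEq, true_and]
              ring
            · intro m stack tot extra
              have hfuel : st + extra = (cst + (st' + extra)) + 1 := by omega
              rw [hfuel]
              have hk1 : ¬ ((k + 1 : Nat) : Int) ≤ 0 := by
                push_cast; omega
              simp only [bloop, if_neg hk1, hg1, hg2]
              have hk2 : ((k + 1 : Nat) : Int) - 1 = ((k : Nat) : Int) := by push_cast; ring
              rw [hk2]
              have := hbl (((k : Nat), m) :: stack) tot (st' + extra)
              rw [this]
              have hpos : idx + 2 + csz + 2 = idx + csz + 2 + 2 := by ring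
              rw [hpos, hbl' m stack (tot + t) extra]
              have hsum : tot + t + u' = tot + (t + u') := by ring
              rw [hsum]

-- ===== VERDICT (by name: the statement is the Claim_ definition above) =====
theorem recursiveFunction_spec : Claim_unchanged_recursiveFunction := by
  intro index nodeList sum _hdom hpre hnd
  unfold Pre_recursiveFunction at hpre
  rw [Option.isSome_iff_exists] at hpre
  obtain ⟨⟨sz, st⟩, hshape⟩ := hpre
  obtain ⟨c, m, t, hg1, hg2, hrec, hbl⟩ :=
    (pv_joint (2 * nodeList.length + 2)).1 nodeList index sz st hshape
  have hb := hbl [] sum 1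
  have h1 : bloop 1 [] (index + sz + 2) nodeList (sum + t) = some (index + sz + 2, sum + t) := by
    simp [bloop]
  have halt : recursiveFunction_alt index nodeList sum
      = ((index + sz + 2) - index - 2, sum + t) := by
    unfold recursiveFunction_alt
    rw [hg1, hg2]
    simp only
    rw [hshape]
    simp only
    rw [hb, h1]
  unfold D_recursiveFunction at hnd
  unfold recursiveFunction
  rw [hrec sum, halt]
  simp only [Option.getD_some, Prod.mk.injEq]
  refine ⟨by omega, ?_⟩
  by_cases hc0 : c = 0
  · rw [hc0] at hg1
    have hs0 : sum = 0 := by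
      by_contra hs
      exact hnd ⟨hg1, hs⟩
    simp [hc0, hs0]
  · simp [hc0]

theorem recursiveFunction_changed : Claim_changed_recursiveFunction := by
  unfold Claim_changed_recursiveFunction; decide

theorem recursiveFunction_tight : Claim_exact_recursiveFunction := by
  intro index nodeList sum _hdom hpre hd
  obtain ⟨hg0, hs⟩ := hd
  unfold Pre_recursiveFunction at hpre
  rw [Option.isSome_iff_exists] at hpre
  obtain ⟨⟨sz, st⟩, hshape⟩ := hpre
  obtain ⟨c, m, t, hg1, hg2, hrec, hbl⟩ :=
    (pv_joint (2 * nodeList.length + 2)).1 nodeList index sz st hshape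
  have hc0 : c = 0 := by
    rw [hg0] at hg1; exact (Option.some.inj hg1).symm
  have hb := hbl [] sum 1
  have h1 : bloop 1 [] (index + sz + 2) nodeList (sum + t) = some (index + sz + 2, sum + t) := by
    simp [bloop]
  have halt : recursiveFunction_alt index nodeList sum
      = ((index + sz + 2) - index - 2, sum + t) := by
    unfold recursiveFunction_alt
    rw [hg1, hg2]
    simp only
    rw [hshape]
    simp only
    rw [hb, h1]
  unfold recursiveFunction
  rw [hrec sum, halt, if_pos hc0]
  simp only [Option.getD_some, ne_eq, Prod.mk.injEq, not_and]
  intro _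
  omega
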